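-- pv_equiv track=rewrite | github.com/m9framar/FMD-GT | GT_utilities.py | halver
-- ===== SOURCE A (Python) =====
-- import math
--
-- def halver(results,lst,num_categories=11):
--     if len(lst) <=1:
--         results.append(lst)
--         return results
--     elif num_categories==0:
--         results.append(lst)
--         return results
--
--
--     else:
--         midpoint = math.ceil(len(lst)/2)
--         first_half = lst[:midpoint]
--         results.append(first_half)
--         second_half = lst[midpoint:]
--
--         return halver(results,second_half,num_categories-1)
-- ===== SOURCE B (Python) =====
-- def halver(results, lst, num_categories=11):
--     # Two phases: compute all cut indices arithmetically, then slice once per piece.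
--     n = len(lst)
--     cuts = [0]
--     i, k = 0, num_categories
--     while n - i > 1 and k != 0:
--         i += (n - i + 1) // 2
--         cuts.append(i)
--         k -= 1
--     cuts.append(n)
--     results.extend(lst[a:b] for a, b in zip(cuts, cuts[1:]))
--     return results
-- ===== Notes on version B (the rewrite author's own statement) =====
-- stated objective: alternative
-- what changed: Replaces A's slice-and-recurse (each step slices the list and recurses with an accumulator) with two phases: an arithmetic while-loop that computes all cut indices from the length alone, then a single pass turning consecutive cut pairs into slices.
import Mathlib
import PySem

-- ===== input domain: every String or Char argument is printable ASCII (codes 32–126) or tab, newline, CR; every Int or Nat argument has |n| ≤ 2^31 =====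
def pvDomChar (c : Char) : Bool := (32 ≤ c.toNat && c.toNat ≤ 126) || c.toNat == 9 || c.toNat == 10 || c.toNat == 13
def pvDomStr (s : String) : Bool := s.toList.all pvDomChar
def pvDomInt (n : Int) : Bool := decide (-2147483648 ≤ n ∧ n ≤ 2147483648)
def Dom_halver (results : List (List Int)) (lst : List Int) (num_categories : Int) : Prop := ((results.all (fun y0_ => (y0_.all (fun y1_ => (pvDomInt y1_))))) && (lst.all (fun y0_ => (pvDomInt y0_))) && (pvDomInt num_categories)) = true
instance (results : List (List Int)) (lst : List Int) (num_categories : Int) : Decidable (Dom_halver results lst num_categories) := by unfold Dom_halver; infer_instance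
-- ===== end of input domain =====

-- B replaces A's slice-and-recurse with two phases: an arithmetic loop computing the cut
-- indices, then one slicing pass (objective: simpler/alternative decomposition).
-- Both Pythons mutate `results` in place; the equivalence proved here is about the RETURN value.

-- ===== PORT A =====
-- math.ceil(len(lst)/2) is exact on this domain (len ≤ 2^31, /2 exact in float) = (len+1)/2 in Nat;
-- lst[:m] / lst[m:] with 0 ≤ m ≤ len are exactly take/drop.
def halver (results : List (List Int)) (lst : List Int) (num_categories : Int) : List (List Int) :=
  if lst.length ≤ 1 then results ++ [lst]
  else if num_categories = 0 then results ++ [lst]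
  else
    let midpoint := (lst.length + 1) / 2
    let first_half := lst.take midpoint
    let second_half := lst.drop midpoint
    halver (results ++ [first_half]) second_half (num_categories - 1)
termination_by lst.length
decreasing_by simp_all; omega

-- ===== PORT B =====
-- the `while` loop of Source B, state (i, k, cuts-so-far); terminates because n - i shrinks
def halverCuts (n i : Nat) (k : Int) (acc : List Nat) : List Nat :=
  if 1 < n - i ∧ k ≠ 0 then
    halverCuts n (i + (n - i + 1) / 2) (k - 1) (acc ++ [i + (n - i + 1) / 2])
  else acc ++ [n]
termination_by n - i
decreasing_by omega

-- lst[a:b] with 0 ≤ a ≤ b ≤ len is exactly (lst.drop a).take (b - a)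
def halver_alt (results : List (List Int)) (lst : List Int) (num_categories : Int) : List (List Int) :=
  let n := lst.length
  let cuts := halverCuts n 0 num_categories [0]
  results ++ (cuts.zip cuts.tail).map (fun p => (lst.drop p.1).take (p.2 - p.1))

-- ===== PRECONDITION & SPEC =====
def Spec_halver (results : List (List Int)) (lst : List Int) (num_categories : Int) (out : List (List Int)) : Prop := out = halver_alt results lst num_categories
instance (results : List (List Int)) (lst : List Int) (num_categories : Int) (out : List (List Int)) : Decidable (Spec_halver results lst num_categories out) := by unfold Spec_halver; infer_instance

-- ===== CLAIM (what is proved, stated in full; the proofs are below) =====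
def Claim_equal_halver : Prop := ∀ (results : List (List Int)) (lst : List Int) (num_categories : Int), Dom_halver results lst num_categories → Spec_halver results lst num_categories (halver results lst num_categories)

-- ===== LEMMAS AND PROOFS =====

-- the common shape: the list of pieces, independent of the accumulator
def piecesA (lst : List Int) (k : Int) : List (List Int) :=
  if lst.length ≤ 1 ∨ k = 0 then [lst]
  else lst.take ((lst.length + 1) / 2) :: piecesA (lst.drop ((lst.length + 1) / 2)) (k - 1)
termination_by lst.length
decreasing_by simp_all; omega

lemma halver_eq_pieces : ∀ (lst : List Int) (results : List (List Int)) (k : Int),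
    halver results lst k = results ++ piecesA lst k := by
  intro lst
  induction hn : lst.length using Nat.strong_induction_on generalizing lst with
  | _ n ih =>
    intro results k
    rw [halver, piecesA]
    by_cases h1 : lst.length ≤ 1
    · simp [h1]
    · by_cases h0 : k = 0
      · simp [h1, h0]
      · simp only [h1, h0, if_false, or_self]
        rw [ih ((lst.drop ((lst.length + 1) / 2)).length) (by simp; omega) _ rfl]
        simp

lemma cuts_append : ∀ (m n i : Nat) (k : Int) (pre acc : List Nat), n - i = m →
    halverCuts n i k (pre ++ acc) = pre ++ halverCuts n i k acc := by
  intro m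
  induction m using Nat.strong_induction_on with
  | _ m ih =>
    intro n i k pre acc hm
    by_cases h : 1 < n - i ∧ k ≠ 0
    · rw [halverCuts, if_pos h, List.append_assoc,
        ih (n - (i + (n - i + 1) / 2)) (by omega) _ _ _ _ _ rfl]
      conv_rhs => rw [halverCuts]
      rw [if_pos h]
    · rw [halverCuts, if_neg h]
      conv_rhs => rw [halverCuts]
      rw [if_neg h, List.append_assoc]

lemma cuts_shift (n i : Nat) (k : Int) (x : Nat) :
    halverCuts n i k [x] = x :: halverCuts n i k [] := by
  have := cuts_append (n - i) n i k [x] [] rfl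
  simpa using this

lemma zmap_pieces : ∀ (m : Nat) (lst : List Int) (i : Nat) (k : Int), lst.length - i = m → i ≤ lst.length →
    (((i :: halverCuts lst.length i k []).zip (halverCuts lst.length i k [])).map
      (fun p => (lst.drop p.1).take (p.2 - p.1))) = piecesA (lst.drop i) k := by
  intro m
  induction m using Nat.strong_induction_on with
  | _ m ih =>
    intro lst i k hm hi
    rw [halverCuts, piecesA]
    by_cases h : 1 < lst.length - i ∧ k ≠ 0
    · have hlen : (lst.drop i).length = lst.length - i := by simp
      have hcond : ¬ ((lst.drop i).length ≤ 1 ∨ k = 0) := by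
        rw [hlen]; push Not; exact ⟨by omega, h.2⟩
      rw [if_pos h, if_neg hcond]
      set md := (lst.length - i + 1) / 2 with hmd
      have hmd2 : ((lst.drop i).length + 1) / 2 = md := by rw [hlen]
      rw [List.nil_append, cuts_shift]
      simp only [List.zip_cons_cons, List.map_cons]
      have hx : (lst.drop i).take (i + md - i) = (lst.drop i).take md := by
        congr 1; omega
      rw [hmd2, hx]
      congr 1
      have := ih (lst.length - (i + md)) (by omega) lst (i + md) (k - 1) rfl (by omega)
      rw [this, List.drop_drop]
    · rw [if_neg h]
      have h1 : (lst.drop i).length ≤ 1 ∨ k = 0 := by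
        simp only [List.length_drop]; omega
      rw [if_pos h1]
      simp only [List.nil_append, List.zip_cons_cons, List.zip_nil_right,
        List.map_cons, List.map_nil]
      have : (lst.drop i).take (lst.length - i) = lst.drop i := by
        apply List.take_of_length_le; simp
      rw [this]

-- ===== VERDICT (by name: the statement is the Claim_ definition above) =====
theorem halver_spec : Claim_equal_halver := by
  intro results lst k _
  unfold Spec_halver halver_alt
  dsimp only
  rw [halver_eq_pieces]
  rw [show halverCuts lst.length 0 k [0] = 0 :: halverCuts lst.length 0 k [] from cuts_shift _ _ _ _]
  rw [List.tail_cons]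
  rw [zmap_pieces (lst.length - 0) lst 0 k rfl (by omega)]
  simp
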